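-- pv_equiv track=rewrite | github.com/reframe-biker/mahousing | pipeline/score.py | _grade_legislators
-- ===== SOURCE A (Python) =====
-- def _grade_legislators(
--     reps: list[dict] | None,
--     sens: list[dict] | None,
-- ) -> str | None:
--     """
--     Derive the town-level legislators grade from the combined pool of
--     RepRecords and SenRecords.
--
--     Uses lower median: with N legislators, takes sorted(grades)[floor(N/2)].
--     Returns None if both reps and sens are None or empty.
--     """
--     import math
--     combined: list[dict] = []
--     if reps:
--         combined.extend(reps)
--     if sens:
--         combined.extend(sens)
--     if not combined:
--         return None
--     grade_scores = {"A": 4, "B": 3, "C": 2, "D": 1, "F": 0}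
--     scores = [grade_scores[r["grade"]] for r in combined
--               if r.get("grade") in grade_scores]
--     if not scores:
--         return None
--     median_score = sorted(scores)[math.floor(len(scores) / 2)]
--     score_to_grade = {4: "A", 3: "B", 2: "C", 1: "D", 0: "F"}
--     return score_to_grade[median_score]
-- ===== SOURCE B (Python) =====
-- def _grade_legislators(
--     reps: list[dict] | None,
--     sens: list[dict] | None,
-- ) -> str | None:
--     # Counting sort over the 5 grade buckets: count each bucket, then walk
--     # cumulative counts to the floor(N/2)-th grade (ascending score order) — no sort.
--     gs = [r.get("grade") for r in (reps or []) + (sens or [])]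
--     cF = gs.count("F")
--     cD = gs.count("D")
--     cC = gs.count("C")
--     cB = gs.count("B")
--     cA = gs.count("A")
--     n = cF + cD + cC + cB + cA
--     if n == 0:
--         return None
--     k = n // 2
--     if k < cF:
--         return "F"
--     if k < cF + cD:
--         return "D"
--     if k < cF + cD + cC:
--         return "C"
--     if k < cF + cD + cC + cB:
--         return "B"
--     return "A"
-- ===== Notes on version B (the rewrite author's own statement) =====
-- stated objective: alternative
-- what changed: Replaced build-score-list + sorted()[N//2] with counting sort: count the 5 grade buckets and walk cumulative counts to the floor(N/2)-th grade, removing the sort (asymptotically O(n) vs O(n log n), though not measurably faster at the timed sizes).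
import Mathlib
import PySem

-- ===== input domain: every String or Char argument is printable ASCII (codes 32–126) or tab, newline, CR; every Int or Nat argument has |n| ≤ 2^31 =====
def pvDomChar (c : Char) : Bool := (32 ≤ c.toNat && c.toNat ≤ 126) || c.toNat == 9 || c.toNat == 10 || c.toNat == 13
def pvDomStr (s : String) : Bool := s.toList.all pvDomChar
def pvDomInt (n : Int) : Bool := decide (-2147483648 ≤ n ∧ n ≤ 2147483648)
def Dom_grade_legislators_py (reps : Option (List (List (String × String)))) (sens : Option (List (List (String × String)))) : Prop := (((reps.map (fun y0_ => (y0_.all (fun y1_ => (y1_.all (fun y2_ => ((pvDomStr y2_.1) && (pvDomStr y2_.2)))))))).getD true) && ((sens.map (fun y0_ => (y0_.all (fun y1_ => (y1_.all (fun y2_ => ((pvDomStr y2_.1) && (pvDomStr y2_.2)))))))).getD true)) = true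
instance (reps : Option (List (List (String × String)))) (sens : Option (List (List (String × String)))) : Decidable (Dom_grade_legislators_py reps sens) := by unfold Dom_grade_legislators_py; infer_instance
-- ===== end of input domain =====

-- B replaces A's build-list + sort + index by a single counting pass over the five
-- grade buckets and a cumulative-count walk to the floor(N/2)-th grade (no sort).

-- ===== PORT A =====
-- A's two literal dicts
def pvGradeScores : PySem.Dict String Int :=
  PySem.Dict.mk [("A", 4), ("B", 3), ("C", 2), ("D", 1), ("F", 0)]
def pvScoreToGrade : PySem.Dict Int String :=
  PySem.Dict.mk [((4 : Int), "A"), ((3 : Int), "B"), ((2 : Int), "C"), ((1 : Int), "D"), ((0 : Int), "F")]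

-- transliteration notes: 'if reps: combined.extend(reps)' — extending with a falsy
-- (None/empty) pool is a no-op, so '(reps.getD []) ++ …' is exact; the comprehension's
-- r["grade"] lookup is guarded by the membership test, so 'getD g 0' is exact there;
-- math.floor(len/2) = floordiv len 2 (exact for list lengths); the 'none' match arm is
-- where Python would raise IndexError/KeyError (unreachable, proved in the lemmas).
def grade_legislators_py (reps : Option (List (List (String × String)))) (sens : Option (List (List (String × String)))) : Option String :=
  let combined := (reps.getD []) ++ (sens.getD [])
  if combined = [] then none
  else
    let scores := combined.foldl (fun acc r =>
      match (PySem.Dict.mk r).get? "grade" with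
      | none => acc
      | some g => if pvGradeScores.contains g then acc ++ [pvGradeScores.getD g 0] else acc) []
    if scores = [] then none
    else
      match PySem.List.pyGet? (PySem.List.sorted scores (fun x => x) false)
              (PySem.Int.floordiv (scores.length : Int) 2) with
      | none => none
      | some m => pvScoreToGrade.get? m

-- ===== PORT B =====
-- extract the grades once, count each of the 5 buckets, then the cumulative walk
def grade_legislators_py_alt (reps : Option (List (List (String × String)))) (sens : Option (List (List (String × String)))) : Option String :=
  let pool := (reps.getD []) ++ (sens.getD [])
  let gs := pool.map (fun r => (PySem.Dict.mk r).get? "grade")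
  let cF := gs.count (some "F")
  let cD := gs.count (some "D")
  let cC := gs.count (some "C")
  let cB := gs.count (some "B")
  let cA := gs.count (some "A")
  let n := cF + cD + cC + cB + cA
  if n = 0 then none
  else
    let k := n / 2
    if k < cF then some "F"
    else if k < cF + cD then some "D"
    else if k < cF + cD + cC then some "C"
    else if k < cF + cD + cC + cB then some "B"
    else some "A"

-- ===== PRECONDITION & SPEC =====
def Spec_grade_legislators_py (reps : Option (List (List (String × String)))) (sens : Option (List (List (String × String)))) (out : Option String) : Prop := out = grade_legislators_py_alt reps sens
instance (reps : Option (List (List (String × String)))) (sens : Option (List (List (String × String)))) (out : Option String) : Decidable (Spec_grade_legislators_py reps sens out) := by unfold Spec_grade_legislators_py; infer_instance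

-- ===== CLAIM (what is proved, stated in full; the proofs are below) =====
def Claim_equal_grade_legislators_py : Prop := ∀ (reps : Option (List (List (String × String)))) (sens : Option (List (List (String × String)))), Dom_grade_legislators_py reps sens → Spec_grade_legislators_py reps sens (grade_legislators_py reps sens)

-- ===== LEMMAS AND PROOFS =====

-- the grade looked up in a record
def pvGKey (r : List (String × String)) : Option String := (PySem.Dict.mk r).get? "grade"
-- the score A's comprehension extracts from a record (none = filtered out)
def pvFsc (r : List (String × String)) : Option Int := (pvGKey r).bind (fun g => pvGradeScores.get? g)
def pvScores (l : List (List (String × String))) : List Int := l.filterMap pvFsc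
-- number of records carrying grade g
def pvCnt (g : String) (l : List (List (String × String))) : Nat :=
  l.countP (fun r => pvGKey r == some g)
-- the counting-sort expansion of a multiset of scores
def pvE (c0 c1 c2 c3 c4 : Nat) : List Int :=
  List.replicate c0 0 ++ List.replicate c1 1 ++ List.replicate c2 2 ++ List.replicate c3 3 ++ List.replicate c4 4

theorem pv_get?_gradeScores (g : String) (v : Int) :
    pvGradeScores.get? g = some v ↔
      (g = "A" ∧ v = 4) ∨ (g = "B" ∧ v = 3) ∨ (g = "C" ∧ v = 2) ∨ (g = "D" ∧ v = 1) ∨ (g = "F" ∧ v = 0) := by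
  simp only [pvGradeScores, PySem.Dict.get?_mk_cons, beq_iff_eq]
  split_ifs with h1 h2 h3 h4 h5 <;> subst_vars <;>
    simp_all [PySem.Dict.get?] <;> try (constructor <;> omega)
  refine ⟨fun h _ => h1 h.symm, fun h _ => h2 h.symm, fun h _ => h3 h.symm, fun h _ => h4 h.symm, fun h _ => h5 h.symm⟩

theorem pv_A_scores (l : List (List (String × String))) (acc : List Int) :
    l.foldl (fun acc r =>
      match (PySem.Dict.mk r).get? "grade" with
      | none => acc
      | some g => if pvGradeScores.contains g then acc ++ [pvGradeScores.getD g 0] else acc) acc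
    = acc ++ pvScores l := by
  induction l generalizing acc with
  | nil => simp [pvScores]
  | cons r t ih =>
    have step : (match (PySem.Dict.mk r).get? "grade" with
      | none => acc
      | some g => if pvGradeScores.contains g then acc ++ [pvGradeScores.getD g 0] else acc)
        = acc ++ (pvFsc r).toList := by
      rcases hg : (PySem.Dict.mk r).get? "grade" with _ | g
      · simp [pvFsc, pvGKey, hg]
      · show (if pvGradeScores.contains g then acc ++ [pvGradeScores.getD g 0] else acc)
              = acc ++ (pvFsc r).toList
        rw [PySem.Dict.contains_eq_isSome_get?]
        rcases hv : pvGradeScores.get? g with _ | v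
        · simp [pvFsc, pvGKey, hg, hv]
        · simp [pvFsc, pvGKey, hg, hv, PySem.Dict.getD_eq_get?_getD]
    simp only [List.foldl_cons, step, ih, pvScores, List.filterMap_cons]
    cases h : pvFsc r <;> simp

theorem pv_count_map (g : String) (l : List (List (String × String))) :
    (l.map (fun r => (PySem.Dict.mk r).get? "grade")).count (some g) = pvCnt g l := by
  simp [pvCnt, pvGKey, List.count, List.countP_map, Function.comp_def]

theorem pvFsc_eq_iff (g : String) (v : Int)
    (hv : pvGradeScores.get? g = some v)
    (huniq : ∀ g', pvGradeScores.get? g' = some v → g' = g) (r : List (String × String)) :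
    (pvFsc r = some v ↔ pvGKey r = some g) := by
  constructor
  · intro h
    simp only [pvFsc, Option.bind_eq_some_iff] at h
    obtain ⟨g', hg', hvv⟩ := h
    rw [huniq g' hvv] at hg'; exact hg'
  · intro h; simp [pvFsc, h, hv]

theorem pv_count_one (v : Int) (g : String)
    (hv : pvGradeScores.get? g = some v)
    (huniq : ∀ g', pvGradeScores.get? g' = some v → g' = g)
    (l : List (List (String × String))) : (pvScores l).count v = pvCnt g l := by
  unfold pvScores pvCnt
  rw [List.count_filterMap]
  apply List.countP_congr
  intro r _
  simp only [beq_iff_eq]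
  exact pvFsc_eq_iff g v hv huniq r

theorem pv_count_scores (l : List (List (String × String))) :
    (pvScores l).count 0 = pvCnt "F" l ∧ (pvScores l).count 1 = pvCnt "D" l ∧
    (pvScores l).count 2 = pvCnt "C" l ∧ (pvScores l).count 3 = pvCnt "B" l ∧
    (pvScores l).count 4 = pvCnt "A" l := by
  refine ⟨pv_count_one 0 "F" (by decide) ?_ l, pv_count_one 1 "D" (by decide) ?_ l,
          pv_count_one 2 "C" (by decide) ?_ l, pv_count_one 3 "B" (by decide) ?_ l,
          pv_count_one 4 "A" (by decide) ?_ l⟩ <;>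
    · intro g' h
      rcases (pv_get?_gradeScores g' _).1 h with ⟨h1,h2⟩|⟨h1,h2⟩|⟨h1,h2⟩|⟨h1,h2⟩|⟨h1,h2⟩ <;> simp_all

theorem pv_mem_scores (l : List (List (String × String))) (v : Int) (h : v ∈ pvScores l) :
    v = 0 ∨ v = 1 ∨ v = 2 ∨ v = 3 ∨ v = 4 := by
  simp only [pvScores, List.mem_filterMap] at h
  obtain ⟨r, _, hr⟩ := h
  simp only [pvFsc, Option.bind_eq_some_iff] at hr
  obtain ⟨g, _, hv⟩ := hr
  rcases (pv_get?_gradeScores g v).1 hv with ⟨_,h⟩|⟨_,h⟩|⟨_,h⟩|⟨_,h⟩|⟨_,h⟩ <;> simp [h]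

theorem pv_len_E (c0 c1 c2 c3 c4 : Nat) : (pvE c0 c1 c2 c3 c4).length = c0 + c1 + c2 + c3 + c4 := by
  simp [pvE]; omega

theorem pv_E_sorted (c0 c1 c2 c3 c4 : Nat) : (pvE c0 c1 c2 c3 c4).Pairwise (· ≤ ·) := by
  simp only [pvE, List.pairwise_append, List.pairwise_replicate, List.mem_replicate]
  simp
  refine ⟨⟨?_,?_⟩,?_⟩ <;> (intro a ha _; rcases ha with h|h <;> try rcases h with h|h <;> try rcases h with h|h) <;> obtain ⟨_, rfl⟩ := h <;> norm_num

theorem pv_sorted_eq_E (s : List Int) (h : ∀ v ∈ s, v = 0 ∨ v = 1 ∨ v = 2 ∨ v = 3 ∨ v = 4) :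
    PySem.List.sorted s (fun x => x) false = pvE (s.count 0) (s.count 1) (s.count 2) (s.count 3) (s.count 4) := by
  apply List.Perm.eq_of_pairwise (fun a b _ _ h1 h2 => le_antisymm h1 h2)
  · exact PySem.List.sorted_pairwise s (fun x => x)
  · exact pv_E_sorted _ _ _ _ _
  · refine (PySem.List.sorted_perm s (fun x => x) false).trans ?_
    rw [List.perm_iff_count]
    intro a
    by_cases ha : a = 0 ∨ a = 1 ∨ a = 2 ∨ a = 3 ∨ a = 4
    · rcases ha with h|h|h|h|h <;> subst h <;>
        simp [pvE, List.count_append, List.count_replicate]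
    · rw [List.count_eq_zero_of_not_mem, List.count_eq_zero_of_not_mem]
      · intro hm
        apply ha
        simp only [pvE, List.mem_append, List.mem_replicate] at hm
        tauto
      · exact fun hm => ha (h a hm)

theorem pv_E_get (c0 c1 c2 c3 c4 k : Nat) (hk : k < c0 + c1 + c2 + c3 + c4) :
    (pvE c0 c1 c2 c3 c4)[k]? =
      some (if k < c0 then (0 : Int) else if k < c0 + c1 then 1 else if k < c0 + c1 + c2 then 2
            else if k < c0 + c1 + c2 + c3 then 3 else 4) := by
  simp only [pvE, List.getElem?_append, List.length_append, List.length_replicate, List.getElem?_replicate]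
  split_ifs <;> simp_all <;> omega

-- ===== VERDICT (by name: the statement is the Claim_ definition above) =====
theorem grade_legislators_py_spec : Claim_equal_grade_legislators_py := by
  intro reps sens _
  unfold Spec_grade_legislators_py grade_legislators_py grade_legislators_py_alt
  simp only [pv_A_scores, pv_count_map, List.nil_append]
  generalize (reps.getD [] ++ sens.getD []) = L
  obtain ⟨h0, h1, h2, h3, h4⟩ := pv_count_scores L
  by_cases hL : L = []
  · subst hL; simp [pvCnt]
  · rw [if_neg hL]
    by_cases hs : pvScores L = []
    · have z : pvCnt "F" L = 0 ∧ pvCnt "D" L = 0 ∧ pvCnt "C" L = 0 ∧ pvCnt "B" L = 0 ∧ pvCnt "A" L = 0 := by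
        rw [← h0, ← h1, ← h2, ← h3, ← h4, hs]; simp
      simp [hs, z.1, z.2.1, z.2.2.1, z.2.2.2.1, z.2.2.2.2]
    · have hsorted := pv_sorted_eq_E (pvScores L) (pv_mem_scores L)
      have hlen : (pvScores L).length
          = (pvScores L).count 0 + (pvScores L).count 1 + (pvScores L).count 2
            + (pvScores L).count 3 + (pvScores L).count 4 := by
        have h := congrArg List.length hsorted
        rw [PySem.List.length_sorted] at h
        rw [h, pv_len_E]
      have hnz : (pvScores L).length ≠ 0 := by
        simpa [List.length_eq_zero_iff] using hs
      have hn : pvCnt "F" L + pvCnt "D" L + pvCnt "C" L + pvCnt "B" L + pvCnt "A" L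
          = (pvScores L).length := by
        rw [← h0, ← h1, ← h2, ← h3, ← h4, hlen]
      rw [if_neg hs, hsorted]
      have hfd : PySem.Int.floordiv ((pvScores L).length : Int) 2
          = (((pvScores L).length / 2 : Nat) : Int) := by
        exact_mod_cast PySem.Int.floordiv_natCast (pvScores L).length 2
      rw [hfd, PySem.List.pyGet?_natCast]
      have hk : (pvScores L).length / 2
          < (pvScores L).count 0 + (pvScores L).count 1 + (pvScores L).count 2
            + (pvScores L).count 3 + (pvScores L).count 4 := by
        rw [← hlen]; exact Nat.div_lt_self (Nat.pos_of_ne_zero hnz) one_lt_two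
      rw [pv_E_get _ _ _ _ _ _ hk]
      rw [hn, if_neg hnz]
      rw [← h0, ← h1, ← h2, ← h3]
      split_ifs <;> decide
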